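-- pv_equiv track=rewrite | github.com/one-trick/aoc2019 | day4/day4.py | check_adjacent_part2
-- ===== SOURCE A (Python) =====
-- def check_adjacent_part2(input_num):
-- 	num_list = []
-- 	for number in str(input_num):
-- 		num_list.append (int(number))
-- 	overall_match = False
-- 	num_of_matches = 0
--
-- 	# Cycle through each value in our number list. Enumerate returns the current index and the current value
-- 	for current_index, current_item in enumerate(num_list[:-1]):
-- 		# Loop through each number and see if it has an adjacent number next to it
-- 		if current_item == num_list[current_index + 1]:
-- 			# This means our current value matches the next value. Increase our counter
-- 			num_of_matches += 1
-- 			if current_index == (len(num_list)-2):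
-- 				# We have hit the last number, so we need to do the same evaluation as below
-- 				if num_of_matches == 1:
-- 					overall_match = True
-- 		else:
-- 			# Our next value no longer matches our current. Let's see how many times we matched. If it's 2, that means our matches were limited to XX
-- 			# Anything more disqualifies us according to the rules, so we disregard it and continue.
-- 			if num_of_matches == 1:
-- 				# Regardless of the rest of the number, we got what we wanted, so set this value
-- 				overall_match = True
-- 				break
-- 			# Since there may be additional numbers left, reset the match count and keep going
-- 			num_of_matches = 0
-- 	return overall_match
-- ===== SOURCE B (Python) =====
-- def check_adjacent_part2(input_num):
--     digits = [int(c) for c in str(input_num)]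
--     while digits:
--         run = 1
--         while run < len(digits) and digits[run] == digits[0]:
--             run += 1
--         if run == 2:
--             return True
--         digits = digits[run:]
--     return False
-- ===== Notes on version B (the rewrite author's own statement) =====
-- stated objective: simpler
-- what changed: B replaces A's enumerate-with-lookahead state machine (running match counter, end-of-list special case, early break) by a run-length grouping pass: take each maximal run of equal digits and succeed iff some run has length exactly 2.
import Mathlib
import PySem

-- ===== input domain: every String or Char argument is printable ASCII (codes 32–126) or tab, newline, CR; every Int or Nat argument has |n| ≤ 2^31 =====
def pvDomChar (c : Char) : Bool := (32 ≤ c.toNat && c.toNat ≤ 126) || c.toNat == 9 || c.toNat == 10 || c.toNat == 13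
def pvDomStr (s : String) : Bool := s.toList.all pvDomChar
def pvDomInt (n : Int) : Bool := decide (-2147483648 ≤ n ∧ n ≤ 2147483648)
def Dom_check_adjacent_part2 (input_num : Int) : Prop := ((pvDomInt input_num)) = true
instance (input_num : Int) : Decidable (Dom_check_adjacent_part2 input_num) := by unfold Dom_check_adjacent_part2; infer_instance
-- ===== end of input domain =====

-- B replaces A's running-counter/early-break state machine by a run-length grouping pass
-- (succeed iff some maximal run of equal digits has length exactly 2); simpler, same O(n) cost.


-- ===== PORT A =====
-- A's loop over enumerate(num_list[:-1]) with the running match counter, the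
-- end-of-list check and the early break.  `pyGetD … 0` is num_list[ci+1],
-- always in range while the loop runs.
def pvALoop (num_list : List Int) : List (Int × Int) → Bool → Int → Bool
  | [], om, _ => om
  | (ci, x) :: rest, om, m =>
    if x = PySem.List.pyGetD num_list (ci + 1) 0 then
      if ci = (num_list.length : Int) - 2 then
        if m + 1 = 1 then pvALoop num_list rest true (m + 1)
        else pvALoop num_list rest om (m + 1)
      else pvALoop num_list rest om (m + 1)
    else
      if m = 1 then true
      else pvALoop num_list rest om 0

def check_adjacent_part2 (input_num : Int) : Bool :=
  let num_list := (PySem.Int.toChars input_num).foldl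
      (fun acc c => acc ++ [(PySem.Int.ofChars? [c]).getD 0]) []
  pvALoop num_list (PySem.List.enumerate (PySem.List.slice num_list none (some (-1))) 0) false 0

-- ===== PORT B =====
-- B's outer while loop: measure the leading run (inner while = takeWhile),
-- succeed iff its length is 2, else continue on digits[run:] (= dropWhile).
def pvRun2 : List Int → Bool
  | [] => false
  | x :: xs =>
    if (xs.takeWhile (fun y => y == x)).length + 1 = 2 then true
    else pvRun2 (xs.dropWhile (fun y => y == x))
termination_by l => l.length
decreasing_by
  have := List.length_dropWhile_le (fun y => y == x) xs
  simp only [List.length_cons]; omega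

def check_adjacent_part2_alt (input_num : Int) : Bool :=
  pvRun2 ((PySem.Int.toChars input_num).map (fun c => (PySem.Int.ofChars? [c]).getD 0))

-- ===== PRECONDITION & SPEC =====
-- Pre_ excludes negative inputs: str(input_num) then begins with '-' and both A and B
-- raise ValueError at int('-').
def Pre_check_adjacent_part2 (input_num : Int) : Prop := 0 ≤ input_num
instance (input_num : Int) : Decidable (Pre_check_adjacent_part2 input_num) := by
  unfold Pre_check_adjacent_part2; infer_instance
def pvWitness_check_adjacent_part2 : Int := 112

def Spec_check_adjacent_part2 (input_num : Int) (out : Bool) : Prop := out = check_adjacent_part2_alt input_num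
instance (input_num : Int) (out : Bool) : Decidable (Spec_check_adjacent_part2 input_num out) := by unfold Spec_check_adjacent_part2; infer_instance

-- ===== CLAIM (what is proved, stated in full; the proofs are below) =====
def Claim_equal_check_adjacent_part2 : Prop := ∀ (input_num : Int), Dom_check_adjacent_part2 input_num → Pre_check_adjacent_part2 input_num → Spec_check_adjacent_part2 input_num (check_adjacent_part2 input_num)

-- ===== LEMMAS AND PROOFS =====

-- Proof-side intermediate: A's loop read off the list itself, pairwise, with the
-- running counter m; om is dropped because A only ever sets it at the very end or at the break.
def pvPair : List Int → Int → Bool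
  | [], _ => false
  | [_], _ => false
  | x :: y :: rest, m =>
    if x = y then
      if rest = [] then decide (m + 1 = 1) else pvPair (y :: rest) (m + 1)
    else if m = 1 then true else pvPair (y :: rest) 0

-- one-step unfolding of pvRun2 on a cons
theorem pvRun2_cons (z : Int) (zs : List Int) :
    pvRun2 (z :: zs)
      = if (zs.takeWhile (fun y => y == z)).length + 1 = 2 then true
        else pvRun2 (zs.dropWhile (fun y => y == z)) := by
  rw [pvRun2]

-- A's loop over the enumerated dropLast, started at index pre.length with counter m,
-- equals pvPair on the corresponding suffix s.
theorem pvALoop_eq_pvPair (s : List Int) : ∀ (pre : List Int) (m : Int),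
    pvALoop (pre ++ s) (PySem.List.enumerate ((pre ++ s).dropLast.drop pre.length) (pre.length : Int)) false m
      = pvPair s m := by
  induction s with
  | nil =>
    intro pre m
    have h : (pre ++ ([] : List Int)).dropLast.drop pre.length = [] :=
      List.drop_eq_nil_of_le (by simp [List.length_dropLast])
    rw [h]
    simp [PySem.List.enumerate, pvALoop, pvPair]
  | cons x s' ih =>
    intro pre m
    rw [List.dropLast_append_cons, List.drop_left]
    cases s' with
    | nil => simp [pvALoop, pvPair]
    | cons y rest =>
      rw [show (x :: y :: rest).dropLast = x :: (y :: rest).dropLast from rfl,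
          PySem.List.enumerate_cons]
      have hget : PySem.List.pyGetD (pre ++ x :: y :: rest) ((pre.length : Int) + 1) 0 = y := by
        have : ((pre.length : Int) + 1) = ((pre.length + 1 : Nat) : Int) := by push_cast; ring
        rw [this, PySem.List.pyGetD_natCast]
        simp [List.getD]
      have hlen : (pre ++ x :: y :: rest).length = pre.length + rest.length + 2 := by
        simp; omega
      have hrec : ∀ (m' : Int),
          pvALoop (pre ++ x :: y :: rest)
            (PySem.List.enumerate ((y :: rest).dropLast) ((pre.length : Int) + 1)) false m'
          = pvPair (y :: rest) m' := by
        intro m'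
        have h1 : pre ++ x :: y :: rest = (pre ++ [x]) ++ (y :: rest) := by simp
        have h2 : ((pre ++ [x]).length : Int) = (pre.length : Int) + 1 := by simp
        have h3 : ((pre ++ [x]) ++ (y :: rest)).dropLast.drop (pre ++ [x]).length
            = (y :: rest).dropLast := by
          rw [List.dropLast_append_cons, List.drop_left]
        have := ih (pre ++ [x]) m'
        rw [h3, h2] at this
        rw [h1, this]
      by_cases hxy : x = y
      · subst hxy
        by_cases hrest : rest = []
        · subst hrest
          by_cases hm : m + 1 = 1
          · simp [pvALoop, hget, hlen, hm, pvPair]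
          · simp [pvALoop, hget, hlen, hm, pvPair]
        · have hrl : (rest.length : Int) ≠ 0 := by
            simpa [List.length_eq_zero_iff] using hrest
          have hc2 : ¬ ((pre.length : Int) = ((pre ++ x :: x :: rest).length : Int) - 2) := by
            simp only [hlen]; push_cast; omega
          rw [show pvALoop (pre ++ x :: x :: rest)
                (((pre.length : Int), x) :: PySem.List.enumerate ((x :: rest).dropLast) ((pre.length : Int) + 1)) false m
              = pvALoop (pre ++ x :: x :: rest)
                (PySem.List.enumerate ((x :: rest).dropLast) ((pre.length : Int) + 1)) false (m + 1) from by
            simp only [pvALoop]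
            rw [hget, if_pos rfl, if_neg hc2]]
          rw [hrec (m + 1)]
          simp [pvPair, hrest]
      · by_cases hm : m = 1
        · simp [pvALoop, hget, hxy, hm, pvPair]
        · rw [show pvALoop (pre ++ x :: y :: rest)
                (((pre.length : Int), x) :: PySem.List.enumerate ((y :: rest).dropLast) ((pre.length : Int) + 1)) false m
              = pvALoop (pre ++ x :: y :: rest)
                (PySem.List.enumerate ((y :: rest).dropLast) ((pre.length : Int) + 1)) false 0 from by
            simp [pvALoop, hget, hxy, hm]]
          rw [hrec 0]
          simp [pvPair, hxy, hm]

-- pvPair with counter m on x :: xs: the current run already has m matches behind it, so it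
-- succeeds iff (leading run of x in xs) + m = 1, and otherwise continues past the run.
theorem pvPair_run (xs : List Int) : ∀ (x : Int) (m : Int), (xs = [] → m = 0) →
    pvPair (x :: xs) m
      = if ((xs.takeWhile (fun y => y == x)).length : Int) + m = 1 then true
        else pvRun2 (xs.dropWhile (fun y => y == x)) := by
  induction xs with
  | nil =>
    intro x m hm
    simp [pvPair, pvRun2, hm rfl]
  | cons y rest ih =>
    intro x m _
    by_cases hxy : y = x
    · subst hxy
      by_cases hrest : rest = []
      · subst hrest
        by_cases hm : m = 0
        · simp [pvPair, hm, List.takeWhile]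
        · have h1 : ¬(((List.takeWhile (fun z => z == y) [y]).length : Int) + m = 1) := by
            simp [List.takeWhile]; omega
          have h2 : ¬(m + 1 = 1) := by omega
          rw [if_neg h1]
          simp [pvPair, h2, List.dropWhile, pvRun2]
      · rw [show pvPair (y :: y :: rest) m = pvPair (y :: rest) (m + 1) from by
              simp [pvPair, hrest]]
        rw [ih y (m + 1) (fun h => absurd h hrest)]
        have ht : (y :: rest).takeWhile (fun z => z == y)
            = y :: rest.takeWhile (fun z => z == y) := by simp
        have hd : (y :: rest).dropWhile (fun z => z == y)
            = rest.dropWhile (fun z => z == y) := by simp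
        rw [ht, hd]
        have hL : (y :: rest.takeWhile (fun z => z == y)).length
            = (rest.takeWhile (fun z => z == y)).length + 1 := rfl
        by_cases hc : ((rest.takeWhile (fun z => z == y)).length : Int) + (m + 1) = 1
        · rw [if_pos hc, if_pos (by rw [hL]; omega)]
        · rw [if_neg hc, if_neg (by rw [hL]; omega)]
    · have hne : (y == x) = false := by simp [hxy]
      have hxy' : ¬ x = y := fun h => hxy h.symm
      have htw : (y :: rest).takeWhile (fun z => z == x) = [] := by
        simp [hne]
      have hdw : (y :: rest).dropWhile (fun z => z == x) = y :: rest := by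
        simp [hne]
      rw [htw, hdw]
      by_cases hm : m = 1
      · simp [pvPair, hxy', hm]
      · have h0 : ¬(((([] : List Int)).length : Int) + m = 1) := by simp; omega
        rw [if_neg h0]
        rw [show pvPair (x :: y :: rest) m = pvPair (y :: rest) 0 from by
              simp [pvPair, hxy', hm]]
        rw [ih y 0 (fun _ => rfl), pvRun2_cons]
        by_cases hc : (rest.takeWhile (fun z => z == y)).length + 1 = 2
        · rw [if_pos hc, if_pos (by omega)]
        · rw [if_neg hc, if_neg (by omega)]

theorem pvPair_eq_pvRun2 (l : List Int) : pvPair l 0 = pvRun2 l := by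
  cases l with
  | nil => simp [pvPair, pvRun2]
  | cons x xs =>
    rw [pvPair_run xs x 0 (fun _ => rfl), pvRun2_cons]
    by_cases hc : (xs.takeWhile (fun y => y == x)).length + 1 = 2
    · rw [if_pos hc, if_pos (by omega)]
    · rw [if_neg hc, if_neg (by omega)]

-- ===== VERDICT (by name: the statement is the Claim_ definition above) =====
theorem check_adjacent_part2_spec : Claim_equal_check_adjacent_part2 := by
  intro n _ _
  unfold Spec_check_adjacent_part2
  show pvALoop ((PySem.Int.toChars n).foldl (fun acc c => acc ++ [(PySem.Int.ofChars? [c]).getD 0]) [])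
      (PySem.List.enumerate (PySem.List.slice ((PySem.Int.toChars n).foldl (fun acc c => acc ++ [(PySem.Int.ofChars? [c]).getD 0]) []) none (some (-1))) 0) false 0
    = pvRun2 ((PySem.Int.toChars n).map (fun c => (PySem.Int.ofChars? [c]).getD 0))
  rw [PySem.List.foldl_append_singleton_eq_map]
  rw [List.nil_append, PySem.List.slice_to_neg_one]
  have h := pvALoop_eq_pvPair
      ((PySem.Int.toChars n).map (fun c => (PySem.Int.ofChars? [c]).getD 0)) [] 0
  simp only [List.nil_append, List.length_nil, Nat.cast_zero, List.drop_zero] at h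
  rw [h, pvPair_eq_pvRun2]
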